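-- pv_equiv track=rewrite | github.com/wkazmierczak/Introduction_to_Computer_Science_AGH_UST_course | zestaw_4/zad_17.py | biggest_surr_sum
-- ===== SOURCE A (Python) =====
-- def biggest_surr_sum(T):
--     l = len(T)
--     row = 0
--     column = 0
--     biggest_suma = 0
--     for x in range(l):
--         for y in range(l):
--             current_sum = surr_sum(T, x, y)
--             if biggest_suma < current_sum:
--                 row = x
--                 column = y
--                 biggest_suma = current_sum
--
--     return row, column
--
-- def surr_sum(T, x, y):
--     l = len(T)
--     suma = - T[x][y]
--     for i in range(-1, 2):
--         for j in range(-1, 2):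
--             if l > x+i >= 0 and l > y + j >= 0:
--                 suma += T[x+i][y+j]
--
--     return suma
-- ===== SOURCE B (Python) =====
-- def biggest_surr_sum(T):
--     # Scatter each cell's value to its 8 in-bounds neighbors, then a separate max scan.
--     n = len(T)
--     sums = {}
--     for x in range(n):
--         for y in range(n):
--             v = T[x][y]
--             for dx, dy in ((-1, -1), (-1, 0), (-1, 1), (0, -1), (0, 1), (1, -1), (1, 0), (1, 1)):
--                 a = x + dx
--                 b = y + dy
--                 if 0 <= a < n and 0 <= b < n:
--                     sums[(a, b)] = sums.get((a, b), 0) + v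
--     row = 0
--     column = 0
--     biggest = 0
--     for x in range(n):
--         for y in range(n):
--             s = sums.get((x, y), 0)
--             if biggest < s:
--                 row = x
--                 column = y
--                 biggest = s
--     return row, column
-- ===== Notes on version B (the rewrite author's own statement) =====
-- stated objective: alternative
-- what changed: B replaces per-cell gathering of the 8-neighbor window with a scatter pass that adds each cell's value into a dictionary entry for every in-bounds neighbor, followed by a separate row-major max scan; A gathers via a surr_sum helper inside the scan itself.
import Mathlib
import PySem

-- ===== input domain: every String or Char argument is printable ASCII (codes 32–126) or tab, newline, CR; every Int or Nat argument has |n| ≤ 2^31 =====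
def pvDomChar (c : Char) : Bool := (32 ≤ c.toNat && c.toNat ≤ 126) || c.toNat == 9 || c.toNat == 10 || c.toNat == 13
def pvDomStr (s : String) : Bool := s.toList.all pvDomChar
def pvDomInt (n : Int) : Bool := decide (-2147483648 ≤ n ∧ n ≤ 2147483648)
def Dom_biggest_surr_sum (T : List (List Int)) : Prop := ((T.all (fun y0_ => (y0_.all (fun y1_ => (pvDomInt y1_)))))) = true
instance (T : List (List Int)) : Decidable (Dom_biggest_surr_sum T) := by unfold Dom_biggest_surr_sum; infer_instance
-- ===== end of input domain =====

-- B replaces A's per-cell gather (surr_sum window) by a scatter pass into a dictionary of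
-- neighbor sums plus a separate row-major max scan; same O(n^2) cost, different algorithm.

-- ===== PORT A =====
def surr_sum (T : List (List Int)) (x y : Int) : Int :=
  let l : Int := T.length
  let suma : Int := - (PySem.List.pyGetD (PySem.List.pyGetD T x []) y 0)
  (PySem.List.pyRange (-1) 2 1).foldl (fun suma i =>
    (PySem.List.pyRange (-1) 2 1).foldl (fun suma j =>
      if l > x + i ∧ x + i ≥ 0 ∧ l > y + j ∧ y + j ≥ 0 then
        suma + PySem.List.pyGetD (PySem.List.pyGetD T (x + i) []) (y + j) 0
      else suma) suma) suma

def biggest_surr_sum (T : List (List Int)) : Int × Int :=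
  let l : Int := T.length
  let st : Int × Int × Int :=
    (PySem.List.pyRange 0 l 1).foldl (fun st x =>
      (PySem.List.pyRange 0 l 1).foldl (fun st y =>
        let current_sum := surr_sum T x y
        if st.2.2 < current_sum then (x, y, current_sum) else st) st) (0, 0, 0)
  (st.1, st.2.1)

-- ===== PORT B =====
def pvOffsets : List (Int × Int) :=
  [(-1, -1), (-1, 0), (-1, 1), (0, -1), (0, 1), (1, -1), (1, 0), (1, 1)]

def biggest_surr_sum_alt (T : List (List Int)) : Int × Int :=
  let n : Int := T.length
  let sums : PySem.Dict (Int × Int) Int :=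
    (PySem.List.pyRange 0 n 1).foldl (fun d x =>
      (PySem.List.pyRange 0 n 1).foldl (fun d y =>
        let v := PySem.List.pyGetD (PySem.List.pyGetD T x []) y 0
        pvOffsets.foldl (fun d o =>
          let a := x + o.1
          let b := y + o.2
          if 0 ≤ a ∧ a < n ∧ 0 ≤ b ∧ b < n then d.insert (a, b) (d.getD (a, b) 0 + v) else d) d) d)
      PySem.Dict.empty
  let st : Int × Int × Int :=
    (PySem.List.pyRange 0 n 1).foldl (fun st x =>
      (PySem.List.pyRange 0 n 1).foldl (fun st y =>
        let s := sums.getD (x, y) 0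
        if st.2.2 < s then (x, y, s) else st) st) (0, 0, 0)
  (st.1, st.2.1)

-- ===== PRECONDITION & SPEC =====
-- Pre_ excludes exactly the inputs on which the Python A raises IndexError:
-- grids with a row shorter than the number of rows (A indexes every row at columns 0..len(T)-1).
def Pre_biggest_surr_sum (T : List (List Int)) : Prop := ∀ r ∈ T, T.length ≤ r.length
instance (T : List (List Int)) : Decidable (Pre_biggest_surr_sum T) := by unfold Pre_biggest_surr_sum; infer_instance

def pvWitness_biggest_surr_sum : List (List Int) := [[1, 2], [3, 4]]

def Spec_biggest_surr_sum (T : List (List Int)) (out : Int × Int) : Prop := out = biggest_surr_sum_alt T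
instance (T : List (List Int)) (out : Int × Int) : Decidable (Spec_biggest_surr_sum T out) := by unfold Spec_biggest_surr_sum; infer_instance

-- ===== CLAIM (what is proved, stated in full; the proofs are below) =====
def Claim_equal_biggest_surr_sum : Prop := ∀ (T : List (List Int)), Dom_biggest_surr_sum T → Pre_biggest_surr_sum T → Spec_biggest_surr_sum T (biggest_surr_sum T)

-- ===== LEMMAS AND PROOFS =====

-- total cell read T[u][v] (default 0), shared shape of both ports' reads
def pvG (T : List (List Int)) (u v : Int) : Int :=
  PySem.List.pyGetD (PySem.List.pyGetD T u []) v 0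

-- the contribution scattered by cell (x,y) into dictionary key q, for one offset (a,b)
def pvTerm (n : Int) (T : List (List Int)) (x y : Int) (q : Int × Int) (a b : Int) : Int :=
  if (0 ≤ x + a ∧ x + a < n ∧ 0 ≤ y + b ∧ y + b < n) ∧ (x + a, y + b) = q then pvG T x y else 0

def pvCellContrib (n : Int) (T : List (List Int)) (x y : Int) (q : Int × Int) : Int :=
  pvTerm n T x y q (-1) (-1) + pvTerm n T x y q (-1) 0 + pvTerm n T x y q (-1) 1 +
  pvTerm n T x y q 0 (-1) + pvTerm n T x y q 0 1 +
  pvTerm n T x y q 1 (-1) + pvTerm n T x y q 1 0 + pvTerm n T x y q 1 1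

def pvSums (T : List (List Int)) : PySem.Dict (Int × Int) Int :=
  (PySem.List.pyRange 0 (T.length : Int) 1).foldl (fun d x =>
    (PySem.List.pyRange 0 (T.length : Int) 1).foldl (fun d y =>
      pvOffsets.foldl (fun d o =>
        if 0 ≤ x + o.1 ∧ x + o.1 < (T.length : Int) ∧ 0 ≤ y + o.2 ∧ y + o.2 < (T.length : Int) then
          d.insert (x + o.1, y + o.2) (d.getD (x + o.1, y + o.2) 0 + pvG T x y) else d) d) d)
    PySem.Dict.empty

def pvScan (score : Int → Int → Int) (n : Int) : Int × Int :=
  let st : Int × Int × Int :=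
    (PySem.List.pyRange 0 n 1).foldl (fun st x =>
      (PySem.List.pyRange 0 n 1).foldl (fun st y =>
        let s := score x y
        if st.2.2 < s then (x, y, s) else st) st) (0, 0, 0)
  (st.1, st.2.1)

lemma pvA_eq_scan (T : List (List Int)) :
    biggest_surr_sum T = pvScan (fun x y => surr_sum T x y) (T.length : Int) := rfl

lemma pvB_eq_scan (T : List (List Int)) :
    biggest_surr_sum_alt T = pvScan (fun x y => (pvSums T).getD (x, y) 0) (T.length : Int) := rfl

lemma pvScan_congr (n : Int) (f g : Int → Int → Int)
    (h : ∀ x y, 0 ≤ x → x < n → 0 ≤ y → y < n → f x y = g x y) : pvScan f n = pvScan g n := by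
  unfold pvScan
  have : (PySem.List.pyRange 0 n 1).foldl (fun st x =>
      (PySem.List.pyRange 0 n 1).foldl (fun st y =>
        let s := f x y
        if st.2.2 < s then (x, y, s) else st) st) ((0 : Int), (0 : Int), (0 : Int)) =
      (PySem.List.pyRange 0 n 1).foldl (fun st x =>
      (PySem.List.pyRange 0 n 1).foldl (fun st y =>
        let s := g x y
        if st.2.2 < s then (x, y, s) else st) st) ((0 : Int), (0 : Int), (0 : Int)) := by
    apply PySem.List.foldl_congr_mem
    intro acc x hx
    apply PySem.List.foldl_congr_mem
    intro acc2 y hy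
    rcases PySem.List.mem_pyRange_one.mp hx with ⟨hx0, hxn⟩
    rcases PySem.List.mem_pyRange_one.mp hy with ⟨hy0, hyn⟩
    simp only [h x y hx0 hxn hy0 hyn]
  rw [this]

lemma pvGetD_ite_insert (d : PySem.Dict (Int × Int) Int) (c : Prop) [Decidable c]
    (k q : Int × Int) (v : Int) :
    (if c then d.insert k (d.getD k 0 + v) else d).getD q 0 =
      d.getD q 0 + (if c ∧ k = q then v else 0) := by
  by_cases hc : c
  · rw [if_pos hc, PySem.Dict.getD_insert]
    by_cases hk : k = q
    · subst hk; simp [hc]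
    · rw [if_neg (fun h => hk h.symm), if_neg (by simp [hk]), add_zero]
  · rw [if_neg hc, if_neg (by simp [hc]), add_zero]

lemma pvGetD_cellStep (n : Int) (T : List (List Int)) (d : PySem.Dict (Int × Int) Int)
    (x y : Int) (q : Int × Int) :
    (pvOffsets.foldl (fun d o =>
        if 0 ≤ x + o.1 ∧ x + o.1 < n ∧ 0 ≤ y + o.2 ∧ y + o.2 < n then
          d.insert (x + o.1, y + o.2) (d.getD (x + o.1, y + o.2) 0 + pvG T x y) else d) d).getD q 0 =
      d.getD q 0 + pvCellContrib n T x y q := by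
  simp only [pvOffsets, List.foldl_cons, List.foldl_nil]
  rw [pvGetD_ite_insert, pvGetD_ite_insert, pvGetD_ite_insert, pvGetD_ite_insert,
      pvGetD_ite_insert, pvGetD_ite_insert, pvGetD_ite_insert, pvGetD_ite_insert]
  simp only [pvCellContrib, pvTerm]
  ring

lemma pvGetD_foldl_add {α : Type} (L : List α)
    (f : PySem.Dict (Int × Int) Int → α → PySem.Dict (Int × Int) Int) (h : α → Int) (q : Int × Int)
    (hf : ∀ d a, (f d a).getD q 0 = d.getD q 0 + h a) :
    ∀ d, ((L.foldl f d).getD q 0) = d.getD q 0 + (L.map h).sum := by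
  induction L with
  | nil => intro d; simp
  | cons a L ih =>
    intro d
    simp only [List.foldl_cons, List.map_cons, List.sum_cons, ih, hf]
    ring

lemma pvGetD_sums (T : List (List Int)) (q : Int × Int) :
    (pvSums T).getD q 0 =
      ((PySem.List.pyRange 0 (T.length : Int) 1).map (fun x =>
        ((PySem.List.pyRange 0 (T.length : Int) 1).map (fun y =>
          pvCellContrib (T.length : Int) T x y q)).sum)).sum := by
  unfold pvSums
  rw [pvGetD_foldl_add _ _ _ q (fun d x => pvGetD_foldl_add _ _ _ q
        (fun d y => pvGetD_cellStep (T.length : Int) T d x y q) d)]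
  rw [PySem.Dict.getD_empty]
  ring

lemma pvSum_map_ite_eq (L : List Int) (hnd : L.Nodup) (a : Int) (h : Int → Int) :
    (L.map (fun u => if u = a then h u else 0)).sum = if a ∈ L then h a else 0 := by
  induction L with
  | nil => simp
  | cons b L ih =>
    rcases List.nodup_cons.mp hnd with ⟨hb, hL⟩
    simp only [List.map_cons, List.sum_cons, List.mem_cons, ih hL]
    by_cases hba : b = a
    · subst hba
      simp [hb]
    · have : ¬ a = b := fun h' => hba h'.symm
      simp [hba, this]

lemma pvSum_pyRange_ite (n a : Int) (h : Int → Int) :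
    ((PySem.List.pyRange 0 n 1).map (fun u => if u = a then h u else 0)).sum =
      if 0 ≤ a ∧ a < n then h a else 0 := by
  rw [pvSum_map_ite_eq _ (PySem.List.nodup_pyRange_one 0 n) a h]
  simp [PySem.List.mem_pyRange_one]

lemma pvOffset_collapse (n x y a b : Int) (T : List (List Int))
    (hx0 : 0 ≤ x) (hxn : x < n) (hy0 : 0 ≤ y) (hyn : y < n) :
    ((PySem.List.pyRange 0 n 1).map (fun u =>
      ((PySem.List.pyRange 0 n 1).map (fun v => pvTerm n T u v (x, y) a b)).sum)).sum =
    if 0 ≤ x - a ∧ x - a < n ∧ 0 ≤ y - b ∧ y - b < n then pvG T (x - a) (y - b) else 0 := by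
  have h1 : ∀ u : Int, (fun v => pvTerm n T u v (x, y) a b) =
      (fun v => if v = y - b then (if u = x - a then pvG T u v else 0) else 0) := by
    intro u
    funext v
    simp only [pvTerm, Prod.mk.injEq]
    split_ifs <;> first | rfl | omega
  have h2 : ∀ u : Int,
      ((PySem.List.pyRange 0 n 1).map (fun v => pvTerm n T u v (x, y) a b)).sum =
        if 0 ≤ y - b ∧ y - b < n then (if u = x - a then pvG T u (y - b) else 0) else 0 := by
    intro u
    rw [h1 u, pvSum_pyRange_ite]
  simp only [h2]
  by_cases hC : 0 ≤ y - b ∧ y - b < n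
  · simp only [if_pos hC]
    rw [pvSum_pyRange_ite n (x - a) (fun u => pvG T u (y - b))]
    split_ifs <;> first | rfl | omega
  · simp only [if_neg hC]
    rw [if_neg (by omega)]
    simp

lemma pvIte_acc (c : Prop) [Decidable c] (s v : Int) :
    (if c then s + v else s) = s + (if c then v else 0) := by
  split_ifs <;> simp

lemma pvPointwise (T : List (List Int)) (x y : Int)
    (hx0 : 0 ≤ x) (hxn : x < (T.length : Int)) (hy0 : 0 ≤ y) (hyn : y < (T.length : Int)) :
    surr_sum T x y = (pvSums T).getD (x, y) 0 := by
  set n : Int := (T.length : Int) with hn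
  -- B side: total scattered contribution at key (x, y)
  rw [pvGetD_sums T (x, y)]
  simp only [pvCellContrib]
  simp only [PySem.List.sum_map_add_int]
  rw [pvOffset_collapse n x y (-1) (-1) T hx0 hxn hy0 hyn,
      pvOffset_collapse n x y (-1) 0 T hx0 hxn hy0 hyn,
      pvOffset_collapse n x y (-1) 1 T hx0 hxn hy0 hyn,
      pvOffset_collapse n x y 0 (-1) T hx0 hxn hy0 hyn,
      pvOffset_collapse n x y 0 1 T hx0 hxn hy0 hyn,
      pvOffset_collapse n x y 1 (-1) T hx0 hxn hy0 hyn,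
      pvOffset_collapse n x y 1 0 T hx0 hxn hy0 hyn,
      pvOffset_collapse n x y 1 1 T hx0 hxn hy0 hyn]
  -- A side: unfold the two literal range(-1, 2) loops
  have hr : PySem.List.pyRange (-1) 2 1 = [-1, 0, 1] := by decide
  have hg : ∀ u v : Int, PySem.List.pyGetD (PySem.List.pyGetD T u []) v 0 = pvG T u v :=
    fun _ _ => rfl
  simp only [surr_sum, hr, List.foldl_cons, List.foldl_nil, pvIte_acc, hg]
  -- match the nine gathered terms with the eight scattered ones
  have hterm : ∀ i j : Int,
      (if n > x + i ∧ x + i ≥ 0 ∧ n > y + j ∧ y + j ≥ 0 then pvG T (x + i) (y + j) else 0) =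
        (if 0 ≤ x - (-i) ∧ x - (-i) < n ∧ 0 ≤ y - (-j) ∧ y - (-j) < n then
          pvG T (x - (-i)) (y - (-j)) else 0) := by
    intro i j
    have e1 : x - (-i) = x + i := by ring
    have e2 : y - (-j) = y + j := by ring
    rw [e1, e2]
    split_ifs <;> first | rfl | omega
  have hcenter :
      (if n > x + 0 ∧ x + 0 ≥ 0 ∧ n > y + 0 ∧ y + 0 ≥ 0 then pvG T (x + 0) (y + 0) else 0) =
        pvG T x y := by
    rw [if_pos (by constructor <;> omega), add_zero, add_zero]
  rw [show ((-1 : Int)) = -(1 : Int) by norm_num] at *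
  rw [hcenter, hterm (-1) (-1), hterm (-1) 0, hterm (-1) 1, hterm 0 (-1), hterm 0 1,
      hterm 1 (-1), hterm 1 0, hterm 1 1]
  simp only [neg_neg, neg_zero]
  ring

-- ===== VERDICT (by name: the statement is the Claim_ definition above) =====
theorem biggest_surr_sum_spec : Claim_equal_biggest_surr_sum := by
  intro T _ _
  unfold Spec_biggest_surr_sum
  rw [pvA_eq_scan, pvB_eq_scan]
  exact pvScan_congr _ _ _ (fun x y hx0 hxn hy0 hyn => pvPointwise T x y hx0 hxn hy0 hyn)
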